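-- pv_equiv track=rewrite | github.com/DevGochan/Algorithm-Study | CDH/4week/2798.py | find_nearest_sum
-- ===== SOURCE A (Python) =====
-- def find_nearest_sum(cards, target):
--     cards.sort()  # 카드를 오름차순으로 정렬합니다.
--     n = len(cards)  # 카드의 개수를 저장합니다.
--     nearest_sum = 0  # 가장 가까운 합을 저장할 변수를 초기화합니다.
--
--     for i in range(n - 2):  # 첫 번째 카드를 선택하는 루프
--         left, right = i + 1, n - 1  # 현재 카드의 오른쪽 끝과 가장 오른쪽 끝을 가리킵니다.
--
--         while left < right:  # 세 번째 카드를 선택하는 루프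
--             total = cards[i] + cards[left] + cards[right]  # 세 카드의 합을 계산합니다.
--             if total <= target:  # 합이 목표값 이하인 경우
--                 if total > nearest_sum:  # 현재 합이 지금까지의 최대 합보다 큰 경우
--                     nearest_sum = total  # 최대 합을 업데이트합니다.
--                 left += 1  # 왼쪽 포인터를 오른쪽으로 이동하여 합을 키웁니다.
--             else:  # 합이 목표값을 넘는 경우
--                 right -= 1  # 오른쪽 포인터를 왼쪽으로 이동하여 합을 줄입니다.
--
--     return nearest_sum  # 가장 가까운 합을 반환합니다.
-- ===== SOURCE B (Python) =====
-- def find_nearest_sum(cards, target):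
--     cards.sort()  # kept so the caller-visible in-place sort matches A
--     n = len(cards)
--     best = 0
--     for i in range(n):  # brute force over all index triples i < j < k
--         for j in range(i + 1, n):
--             for k in range(j + 1, n):
--                 total = cards[i] + cards[j] + cards[k]
--                 if total <= target and total > best:
--                     best = total
--     return best
-- ===== Notes on version B (the rewrite author's own statement) =====
-- stated objective: simpler
-- what changed: Replaced the sort-plus-two-pointer scan (whose correctness needs a dominance argument) with a plain brute-force enumeration of all i<j<k triples keeping the best sum <= target; the in-place sort is kept only for the caller-visible mutation.
import Mathlib
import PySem

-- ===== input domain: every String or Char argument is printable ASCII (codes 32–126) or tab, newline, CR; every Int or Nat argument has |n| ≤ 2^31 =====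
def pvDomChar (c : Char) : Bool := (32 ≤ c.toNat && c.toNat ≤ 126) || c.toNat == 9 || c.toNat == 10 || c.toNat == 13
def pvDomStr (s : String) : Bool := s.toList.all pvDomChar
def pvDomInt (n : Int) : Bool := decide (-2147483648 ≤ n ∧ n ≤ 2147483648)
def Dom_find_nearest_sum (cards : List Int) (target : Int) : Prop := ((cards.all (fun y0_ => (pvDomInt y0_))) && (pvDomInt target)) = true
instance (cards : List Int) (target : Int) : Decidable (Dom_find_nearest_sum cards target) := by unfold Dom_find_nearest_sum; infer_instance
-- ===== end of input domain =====

-- B replaces A's sort+two-pointer scan by a brute-force enumeration of all i<j<k index triples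
-- (objective: simpler, not faster). Both Pythons sort `cards` in place; the equivalence
-- proved here is about the RETURN value (both ports read the sorted copy).

-- ===== PORT A =====
-- A's `while left < right` loop; the local `total` is inlined; indices via pyGetD (every index reached is in range)
def aInnerLoop (s : List Int) (target c left right acc : Int) : Int :=
  if left < right then
    if c + PySem.List.pyGetD s left 0 + PySem.List.pyGetD s right 0 ≤ target then
      aInnerLoop s target c (left + 1) right
        (if acc < c + PySem.List.pyGetD s left 0 + PySem.List.pyGetD s right 0
         then c + PySem.List.pyGetD s left 0 + PySem.List.pyGetD s right 0 else acc)
    else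
      aInnerLoop s target c left (right - 1) acc
  else acc
termination_by (right - left).toNat
decreasing_by all_goals omega

def find_nearest_sum (cards : List Int) (target : Int) : Int :=
  let s := PySem.List.sorted cards (fun x => x) false
  let n : Int := s.length
  (PySem.List.pyRange 0 (n - 2) 1).foldl
    (fun acc i => aInnerLoop s target (PySem.List.pyGetD s i 0) (i + 1) (n - 1) acc) 0

-- ===== PORT B =====
-- B's three nested index loops; the local `total` is inlined
def find_nearest_sum_alt (cards : List Int) (target : Int) : Int :=
  let s := PySem.List.sorted cards (fun x => x) false
  let n : Int := s.length
  (PySem.List.pyRange 0 n 1).foldl (fun best i =>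
    (PySem.List.pyRange (i + 1) n 1).foldl (fun best j =>
      (PySem.List.pyRange (j + 1) n 1).foldl (fun best k =>
        if PySem.List.pyGetD s i 0 + PySem.List.pyGetD s j 0 + PySem.List.pyGetD s k 0 ≤ target ∧
           PySem.List.pyGetD s i 0 + PySem.List.pyGetD s j 0 + PySem.List.pyGetD s k 0 > best
        then PySem.List.pyGetD s i 0 + PySem.List.pyGetD s j 0 + PySem.List.pyGetD s k 0
        else best) best) best) 0

-- ===== PRECONDITION & SPEC =====
def Spec_find_nearest_sum (cards : List Int) (target : Int) (out : Int) : Prop := out = find_nearest_sum_alt cards target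
instance (cards : List Int) (target : Int) (out : Int) : Decidable (Spec_find_nearest_sum cards target out) := by unfold Spec_find_nearest_sum; infer_instance

-- ===== CLAIM (what is proved, stated in full; the proofs are below) =====
def Claim_equal_find_nearest_sum : Prop := ∀ (cards : List Int) (target : Int), Dom_find_nearest_sum cards target → Spec_find_nearest_sum cards target (find_nearest_sum cards target)

-- ===== LEMMAS AND PROOFS =====

lemma aInnerLoop_stop (s : List Int) (target c left right acc : Int) (h : ¬ left < right) :
    aInnerLoop s target c left right acc = acc := by
  rw [aInnerLoop, if_neg h]

-- B's inner double loop over j < k restricted to the window [l,r] (the window A's two-pointer scans)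
def pvG (s : List Int) (target c l r acc : Int) : Int :=
  (PySem.List.pyRange l r 1).foldl (fun best j =>
    (PySem.List.pyRange (j + 1) (r + 1) 1).foldl (fun best k =>
      if c + PySem.List.pyGetD s j 0 + PySem.List.pyGetD s k 0 ≤ target ∧
         c + PySem.List.pyGetD s j 0 + PySem.List.pyGetD s k 0 > best
      then c + PySem.List.pyGetD s j 0 + PySem.List.pyGetD s k 0
      else best) best) acc

lemma pvFold_ge (target : Int) (v : Int → Int) : ∀ (ks : List Int) (acc : Int),
    acc ≤ ks.foldl (fun a k => if v k ≤ target ∧ v k > a then v k else a) acc := by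
  intro ks
  induction ks with
  | nil => intro acc; simp
  | cons k ks ih =>
    intro acc
    refine le_trans ?_ (ih (if v k ≤ target ∧ v k > acc then v k else acc))
    split_ifs <;> omega

lemma pvFold_le (target : Int) (v : Int → Int) (M : Int) : ∀ (ks : List Int) (acc : Int),
    acc ≤ M → (∀ k ∈ ks, v k ≤ M) →
    ks.foldl (fun a k => if v k ≤ target ∧ v k > a then v k else a) acc ≤ M := by
  intro ks
  induction ks with
  | nil => intro acc h _; simpa using h
  | cons k ks ih =>
    intro acc h hk
    simp only [List.foldl_cons]
    have hkk := hk k (List.mem_cons_self ..)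
    exact ih _ (by split_ifs <;> omega) (fun x hx => hk x (List.mem_cons_of_mem _ hx))

-- a fold whose last value dominates all the others and fits under target computes A's update
lemma pvFold_top (target u : Int) (s : List Int) (ks : List Int) (acc r : Int)
    (hle : ∀ k ∈ ks, PySem.List.pyGetD s k 0 ≤ PySem.List.pyGetD s r 0)
    (hrT : u + PySem.List.pyGetD s r 0 ≤ target) :
    (ks ++ [r]).foldl (fun a k =>
        if u + PySem.List.pyGetD s k 0 ≤ target ∧ u + PySem.List.pyGetD s k 0 > a
        then u + PySem.List.pyGetD s k 0 else a) acc
      = if acc < u + PySem.List.pyGetD s r 0 then u + PySem.List.pyGetD s r 0 else acc := by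
  have hge := pvFold_ge target (fun k => u + PySem.List.pyGetD s k 0) ks acc
  have hub := pvFold_le target (fun k => u + PySem.List.pyGetD s k 0)
    (max acc (u + PySem.List.pyGetD s r 0)) ks acc (le_max_left _ _)
    (fun k hk => by have := hle k hk; simp only; omega)
  simp only at hge hub
  rw [List.foldl_append]
  simp only [List.foldl_cons, List.foldl_nil]
  split_ifs with h1 h2 h2 <;> omega

-- the two-pointer window scan equals brute force over the window, on a monotone array
lemma pvInner_eq (s : List Int) (target c : Int)
    (hmono : ∀ j k : Int, 0 ≤ j → j ≤ k → k < (s.length : Int) →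
      PySem.List.pyGetD s j 0 ≤ PySem.List.pyGetD s k 0) :
    ∀ (l r acc : Int), 0 ≤ l → r ≤ (s.length : Int) - 1 →
      aInnerLoop s target c l r acc = pvG s target c l r acc := by
  intro l r acc
  induction l, r, acc using aInnerLoop.induct s target c with
  | case1 l r acc hlr htot ih =>
    intro hl hr
    simp only [dite_eq_ite] at ih
    rw [aInnerLoop, if_pos hlr, if_pos htot, ih (by omega) hr]
    symm
    unfold pvG
    rw [PySem.List.pyRange_one_cons hlr, List.foldl_cons,
      PySem.List.pyRange_one_succ_right (by omega : l + 1 ≤ r),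
      pvFold_top target (c + PySem.List.pyGetD s l 0) s (PySem.List.pyRange (l + 1) r 1) acc r
        (fun k hk => by
          have hmem := (PySem.List.mem_pyRange_one).1 hk
          exact hmono k r (by omega) (by omega) (by omega)) htot]
  | case2 l r acc hlr htot ih =>
    intro hl hr
    rw [aInnerLoop, if_pos hlr, if_neg htot, ih hl (by omega)]
    symm
    unfold pvG
    -- the k = r column: for every j in [l, r), the sum with k = r exceeds target, so drop it
    have hcol : ∀ (best j : Int), j ∈ PySem.List.pyRange l r 1 →
        (PySem.List.pyRange (j + 1) (r + 1) 1).foldl (fun best k =>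
          if c + PySem.List.pyGetD s j 0 + PySem.List.pyGetD s k 0 ≤ target ∧
             c + PySem.List.pyGetD s j 0 + PySem.List.pyGetD s k 0 > best
          then c + PySem.List.pyGetD s j 0 + PySem.List.pyGetD s k 0 else best) best
        = (PySem.List.pyRange (j + 1) ((r - 1) + 1) 1).foldl (fun best k =>
          if c + PySem.List.pyGetD s j 0 + PySem.List.pyGetD s k 0 ≤ target ∧
             c + PySem.List.pyGetD s j 0 + PySem.List.pyGetD s k 0 > best
          then c + PySem.List.pyGetD s j 0 + PySem.List.pyGetD s k 0 else best) best := by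
      intro best j hj
      have hmem := (PySem.List.mem_pyRange_one).1 hj
      have hre : (r - 1) + 1 = r := by omega
      rw [hre, PySem.List.pyRange_one_succ_right (by omega : j + 1 ≤ r), List.foldl_append]
      simp only [List.foldl_cons, List.foldl_nil]
      have hlj := hmono l j (by omega) (by omega) (by omega)
      split_ifs with h
      · exact absurd h.1 (by omega)
      · rfl
    refine Eq.trans (PySem.List.foldl_congr_mem _ _ _ _ hcol) ?_
    rw [PySem.List.pyRange_one_append l (r - 1) r (by omega) (by omega), List.foldl_append]
    have hsing : PySem.List.pyRange (r - 1) r 1 = [r - 1] := by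
      rw [PySem.List.pyRange_one_cons (by omega : r - 1 < r),
        PySem.List.pyRange_one_eq_nil (by omega : r ≤ r - 1 + 1)]
    rw [hsing]
    simp only [List.foldl_cons, List.foldl_nil]
    rw [PySem.List.pyRange_one_eq_nil (by omega : (r - 1) + 1 ≤ (r - 1) + 1)]
    simp only [List.foldl_nil]
  | case3 l r acc hlr =>
    intro _ _
    rw [aInnerLoop, if_neg hlr]
    unfold pvG
    rw [PySem.List.pyRange_one_eq_nil (by omega : r ≤ l)]
    rfl

-- B's body for a fixed first card i is the brute force over the window [i+1, n-1]
lemma pvBodyB_eq (s : List Int) (target : Int) (i best : Int) (_hi0 : 0 ≤ i)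
    (hin : i < (s.length : Int)) :
    (PySem.List.pyRange (i + 1) ((s.length : Int)) 1).foldl (fun best j =>
      (PySem.List.pyRange (j + 1) ((s.length : Int)) 1).foldl (fun best k =>
        if PySem.List.pyGetD s i 0 + PySem.List.pyGetD s j 0 + PySem.List.pyGetD s k 0 ≤ target ∧
           PySem.List.pyGetD s i 0 + PySem.List.pyGetD s j 0 + PySem.List.pyGetD s k 0 > best
        then PySem.List.pyGetD s i 0 + PySem.List.pyGetD s j 0 + PySem.List.pyGetD s k 0
        else best) best) best
    = pvG s target (PySem.List.pyGetD s i 0) (i + 1) ((s.length : Int) - 1) best := by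
  have hn1 : ((s.length : Int) - 1) + 1 = (s.length : Int) := by omega
  unfold pvG
  rw [hn1]
  by_cases hc : i + 1 ≤ (s.length : Int) - 1
  · rw [PySem.List.pyRange_one_append (i + 1) ((s.length : Int) - 1) (s.length : Int) hc (by omega),
      List.foldl_append]
    have hsing : PySem.List.pyRange ((s.length : Int) - 1) (s.length : Int) 1
        = [(s.length : Int) - 1] := by
      rw [PySem.List.pyRange_one_cons (by omega : (s.length : Int) - 1 < (s.length : Int)),
        PySem.List.pyRange_one_eq_nil (by omega : (s.length : Int) ≤ (s.length : Int) - 1 + 1)]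
    rw [hsing]
    simp only [List.foldl_cons, List.foldl_nil]
    rw [PySem.List.pyRange_one_eq_nil (by omega : (s.length : Int) ≤ ((s.length : Int) - 1) + 1)]
    simp only [List.foldl_nil]
  · rw [PySem.List.pyRange_one_eq_nil (by omega : (s.length : Int) ≤ i + 1),
      PySem.List.pyRange_one_eq_nil (by omega : (s.length : Int) - 1 ≤ i + 1)]

-- ===== VERDICT (by name: the statement is the Claim_ definition above) =====
theorem find_nearest_sum_spec : Claim_equal_find_nearest_sum := by
  intro cards target _
  unfold Spec_find_nearest_sum
  simp only [find_nearest_sum, find_nearest_sum_alt]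
  set s : List Int := PySem.List.sorted cards (fun x => x) false with hs
  have hmono : ∀ j k : Int, 0 ≤ j → j ≤ k → k < (s.length : Int) →
      PySem.List.pyGetD s j 0 ≤ PySem.List.pyGetD s k 0 := by
    intro j k hj hjk hk
    rw [PySem.List.pyGetD_eq_getElem s 0 hj (by omega),
      PySem.List.pyGetD_eq_getElem s 0 (le_trans hj hjk) (by omega)]
    exact PySem.List.sorted_id_getElem_mono cards (p := j.toNat) (q := k.toNat)
      (by omega) (by rw [← hs]; omega)
  symm
  have hbody : ∀ (best i : Int), i ∈ PySem.List.pyRange 0 ((s.length : Int)) 1 →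
      (PySem.List.pyRange (i + 1) ((s.length : Int)) 1).foldl (fun best j =>
        (PySem.List.pyRange (j + 1) ((s.length : Int)) 1).foldl (fun best k =>
          if PySem.List.pyGetD s i 0 + PySem.List.pyGetD s j 0 + PySem.List.pyGetD s k 0 ≤ target ∧
             PySem.List.pyGetD s i 0 + PySem.List.pyGetD s j 0 + PySem.List.pyGetD s k 0 > best
          then PySem.List.pyGetD s i 0 + PySem.List.pyGetD s j 0 + PySem.List.pyGetD s k 0
          else best) best) best
      = aInnerLoop s target (PySem.List.pyGetD s i 0) (i + 1) ((s.length : Int) - 1) best := by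
    intro best i hi
    have hmem := (PySem.List.mem_pyRange_one).1 hi
    rw [pvBodyB_eq s target i best (by omega) (by omega),
      pvInner_eq s target _ hmono (i + 1) ((s.length : Int) - 1) best (by omega) (by omega)]
  refine Eq.trans (PySem.List.foldl_congr_mem _ _ _ _ hbody) ?_
  by_cases h2 : 2 ≤ (s.length : Int)
  · rw [PySem.List.pyRange_one_append 0 ((s.length : Int) - 2) (s.length : Int) (by omega) (by omega),
      List.foldl_append]
    have htail : PySem.List.pyRange ((s.length : Int) - 2) (s.length : Int) 1
        = [(s.length : Int) - 2, (s.length : Int) - 1] := by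
      rw [PySem.List.pyRange_one_cons (by omega : (s.length : Int) - 2 < (s.length : Int)),
        show (s.length : Int) - 2 + 1 = (s.length : Int) - 1 from by omega,
        PySem.List.pyRange_one_cons (by omega : (s.length : Int) - 1 < (s.length : Int)),
        PySem.List.pyRange_one_eq_nil (by omega : (s.length : Int) ≤ (s.length : Int) - 1 + 1)]
    rw [htail]
    simp only [List.foldl_cons, List.foldl_nil]
    rw [aInnerLoop_stop _ _ _ _ _ _ (by omega : ¬ (s.length : Int) - 2 + 1 < (s.length : Int) - 1),
      aInnerLoop_stop _ _ _ _ _ _ (by omega : ¬ (s.length : Int) - 1 + 1 < (s.length : Int) - 1)]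
  · rw [PySem.List.pyRange_one_eq_nil (by omega : (s.length : Int) - 2 ≤ 0)]
    simp only [List.foldl_nil]
    have hid : ∀ (best i : Int), i ∈ PySem.List.pyRange 0 ((s.length : Int)) 1 →
        aInnerLoop s target (PySem.List.pyGetD s i 0) (i + 1) ((s.length : Int) - 1) best
          = (fun (a : Int) (_ : Int) => a) best i := by
      intro best i hi
      have hmem := (PySem.List.mem_pyRange_one).1 hi
      exact aInnerLoop_stop _ _ _ _ _ _ (by omega : ¬ i + 1 < (s.length : Int) - 1)
    refine Eq.trans (PySem.List.foldl_congr_mem _ _ _ _ hid) ?_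
    induction PySem.List.pyRange 0 ((s.length : Int)) 1 with
    | nil => rfl
    | cons x L ih => exact ih
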